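-- pv_equiv track=rewrite | github.com/dn6049949/library | math/BostanMori.py | mul_even
-- ===== SOURCE A (Python) =====
-- def mul_even(p, q):
--     res = [0]*((len(p)+len(q))>>1)
--     for i, pi in enumerate(p):
--         for j, qj in enumerate(q):
--             k = i+j
--             if not k&1:
--                 res[k>>1] += pi*qj
--     return res
-- ===== SOURCE B (Python) =====
-- def mul_even(p, q):
--     # Gather: compute each even coefficient of p*q directly over its tight index window.
--     n = (len(p) + len(q)) >> 1
--     return [sum(p[i] * q[2*m - i]
--                 for i in range(max(0, 2*m - len(q) + 1), min(2*m + 1, len(p))))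
--             for m in range(n)]
-- ===== Notes on version B (the rewrite author's own statement) =====
-- stated objective: alternative
-- what changed: B builds each even coefficient directly (gather: one comprehension summing p[i]*q[2m-i] over the tight valid window) instead of scattering every (i,j) pair into an accumulator array and filtering by parity, so it visits only the even-sum index pairs.
import Mathlib
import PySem

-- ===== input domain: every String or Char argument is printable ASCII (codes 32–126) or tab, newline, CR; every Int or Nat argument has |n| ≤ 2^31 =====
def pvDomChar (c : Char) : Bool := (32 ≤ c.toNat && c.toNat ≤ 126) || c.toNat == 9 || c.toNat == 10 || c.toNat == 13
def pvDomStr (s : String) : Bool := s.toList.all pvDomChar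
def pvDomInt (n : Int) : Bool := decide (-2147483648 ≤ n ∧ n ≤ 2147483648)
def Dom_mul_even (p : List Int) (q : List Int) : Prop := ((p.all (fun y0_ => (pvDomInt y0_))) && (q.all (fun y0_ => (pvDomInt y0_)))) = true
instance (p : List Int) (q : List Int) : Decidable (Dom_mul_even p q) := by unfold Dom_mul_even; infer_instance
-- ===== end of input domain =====

-- B computes each even coefficient of p*q directly over its tight index window (gather)
-- instead of A's scatter of every (i,j) pair into an accumulator with a parity test,
-- visiting only the even-sum index pairs (same asymptotic cost).

-- ===== PORT A =====
-- inner loop body of A: `k = i+j; if not k&1: res[k>>1] += pi*qj`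
-- (the index k>>1 is provably always in range, so the total pySetD/pyGetD are exact here)
def pvA_inner (x : Int × Int) (res : List Int) (y : Int × Int) : List Int :=
  let k : Int := x.1 + y.1
  if PySem.Int.band k 1 = 0 then
    PySem.List.pySetD res (k >>> (1:Nat)) (PySem.List.pyGetD res (k >>> (1:Nat)) 0 + x.2 * y.2)
  else res

def mul_even (p : List Int) (q : List Int) : List Int :=
  let res : List Int := List.replicate ((p.length + q.length) >>> 1) (0 : Int)
  (PySem.List.enumerate p 0).foldl
    (fun res x => (PySem.List.enumerate q 0).foldl (pvA_inner x) res) res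

-- ===== PORT B =====
-- `sum(p[i]*q[2*m - i] for i in range(max(0, 2*m - len(q) + 1), min(2*m + 1, len(p))))`:
-- every index of the window is provably in range, so the total pyGetD is exact here
def pvB_coeff (p : List Int) (q : List Int) (m : Int) : Int :=
  ((PySem.List.pyRange (max 0 (2*m - (q.length:Int) + 1)) (min (2*m + 1) (p.length:Int)) 1).map
    (fun i => PySem.List.pyGetD p i 0 * PySem.List.pyGetD q (2*m - i) 0)).sum

def mul_even_alt (p : List Int) (q : List Int) : List Int :=
  let n : Int := (((p.length + q.length : Nat)) : Int) >>> (1:Nat)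
  (PySem.List.pyRange 0 n 1).map (fun m => pvB_coeff p q m)

-- ===== PRECONDITION & SPEC =====
def Spec_mul_even (p : List Int) (q : List Int) (out : List Int) : Prop := out = mul_even_alt p q
instance (p : List Int) (q : List Int) (out : List Int) : Decidable (Spec_mul_even p q out) := by unfold Spec_mul_even; infer_instance

-- ===== CLAIM (what is proved, stated in full; the proofs are below) =====
def Claim_equal_mul_even : Prop := ∀ (p : List Int) (q : List Int), Dom_mul_even p q → Spec_mul_even p q (mul_even p q)

-- ===== LEMMAS AND PROOFS =====

-- the common reference value: entry t is Σ_{i ≤ 2t} p[i]*q[2t-i] (getD-style: 0 out of range)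
def pvP (p : List Int) (q : List Int) (t i : Nat) : Int := p.getD i 0 * q.getD (2*t - i) 0

lemma pvSet_getD (l : List Int) (i : Nat) (v : Int) (t : Nat) :
    (l.set i v).getD t 0 = if t = i ∧ i < l.length then v else l.getD t 0 := by
  simp only [List.getD_eq_getElem?_getD, List.getElem?_set]
  by_cases h1 : i = t
  · subst h1
    by_cases h2 : i < l.length <;> simp [h2]
  · have h1' : ¬ (t = i) := fun h => h1 h.symm
    simp [h1, h1']

lemma pvA_inner_len (x y : Int × Int) (res : List Int) :
    (pvA_inner x res y).length = res.length := by
  unfold pvA_inner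
  dsimp only
  split_ifs <;> simp [PySem.List.length_pySetD]

-- one `res[k>>1] += pi*qj` step, phrased as `add the term whose index pair sums to 2t`
lemma pvStep (x y : Int × Int) (hx : 0 ≤ x.1) (hy : 0 ≤ y.1) (res : List Int) (t : Nat) :
    (pvA_inner x res y).getD t 0 =
      res.getD t 0 + (if x.1 + y.1 = 2*(t:Int) ∧ t < res.length then x.2 * y.2 else 0) := by
  unfold pvA_inner
  dsimp only
  simp only [PySem.Int.band_one]
  set k : Int := x.1 + y.1 with hk
  have hk0 : 0 ≤ k := by positivity
  rcases PySem.Int.mod_two_eq k with he | ho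
  · have hdvd : (2:Int) ∣ k := (PySem.Int.mod_eq_zero_iff_dvd k 2).mp he
    obtain ⟨c, hc⟩ := hdvd
    have hsh : k >>> (1:Nat) = c := by
      rw [Int.shiftRight_eq_div_pow]
      omega
    have hc0 : 0 ≤ c := by omega
    rw [he, if_pos rfl, hsh, PySem.List.pySetD_of_nonneg res _ hc0,
        PySem.List.pyGetD_of_nonneg res 0 hc0, pvSet_getD]
    by_cases hcase : k = 2*(t:Int) ∧ t < res.length
    · have h1 : t = c.toNat ∧ c.toNat < res.length := by omega
      rw [if_pos h1, if_pos hcase]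
      have : c.toNat = t := by omega
      rw [this]
    · have h1 : ¬ (t = c.toNat ∧ c.toNat < res.length) := by omega
      rw [if_neg h1, if_neg hcase, add_zero]
  · have hne : PySem.Int.mod k 2 ≠ 0 := by omega
    rw [if_neg hne]
    have : ¬ (k = 2*(t:Int) ∧ t < res.length) := by
      rintro ⟨h1, _⟩
      have : (2:Int) ∣ k := ⟨t, h1⟩
      rw [(PySem.Int.mod_eq_zero_iff_dvd k 2).mpr this] at ho
      omega
    rw [if_neg this, add_zero]

lemma pvInner_len (x : Int × Int) (L : List (Int × Int)) (res : List Int) :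
    (L.foldl (pvA_inner x) res).length = res.length := by
  induction L generalizing res with
  | nil => rfl
  | cons y L ih => rw [List.foldl_cons, ih, pvA_inner_len]

lemma pvInner_getD (x : Int × Int) (hx : 0 ≤ x.1) (L : List (Int × Int))
    (hL : ∀ y ∈ L, 0 ≤ y.1) (res : List Int) (t : Nat) :
    (L.foldl (pvA_inner x) res).getD t 0 =
      res.getD t 0 + (L.map (fun y => if x.1 + y.1 = 2*(t:Int) ∧ t < res.length then x.2 * y.2 else 0)).sum := by
  induction L generalizing res with
  | nil => simp
  | cons y L ih =>
    rw [List.foldl_cons, ih (fun z hz => hL z (List.mem_cons_of_mem y hz)),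
        pvStep x y hx (hL y List.mem_cons_self), List.map_cons, List.sum_cons,
        pvA_inner_len]
    ring

lemma pvOuter_len (q : List Int) (L : List (Int × Int)) (res : List Int) :
    (L.foldl (fun res x => (PySem.List.enumerate q 0).foldl (pvA_inner x) res) res).length = res.length := by
  induction L generalizing res with
  | nil => rfl
  | cons x L ih => rw [List.foldl_cons, ih, pvInner_len]

lemma pvOuter_getD (q : List Int) (L : List (Int × Int)) (hL : ∀ x ∈ L, 0 ≤ x.1)
    (hq : ∀ y ∈ PySem.List.enumerate q 0, 0 ≤ y.1)
    (res : List Int) (t : Nat) :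
    (L.foldl (fun res x => (PySem.List.enumerate q 0).foldl (pvA_inner x) res) res).getD t 0 =
      res.getD t 0 + (L.map (fun x =>
        ((PySem.List.enumerate q 0).map (fun y => if x.1 + y.1 = 2*(t:Int) ∧ t < res.length then x.2 * y.2 else 0)).sum)).sum := by
  induction L generalizing res with
  | nil => simp
  | cons x L ih =>
    rw [List.foldl_cons, ih (fun z hz => hL z (List.mem_cons_of_mem x hz)),
        pvInner_getD x (hL x List.mem_cons_self) _ hq, List.map_cons, List.sum_cons,
        pvInner_len]
    ring

lemma pvEnum_eq (xs : List Int) (s : Int) :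
    PySem.List.enumerate xs s = (List.range xs.length).map (fun (j : Nat) => ((s + (j:Int) : Int), xs.getD j 0)) := by
  induction xs generalizing s with
  | nil => simp [PySem.List.enumerate_nil]
  | cons x xs ih =>
    rw [PySem.List.enumerate_cons, ih (s+1)]
    simp [List.range_succ_eq_map, List.map_map, Function.comp]
    intro a _
    ring

lemma pvEnum_nonneg (xs : List Int) : ∀ z ∈ PySem.List.enumerate xs 0, 0 ≤ z.1 := by
  rw [pvEnum_eq]
  intro z hz
  simp only [List.mem_map, List.mem_range] at hz
  obtain ⟨j, _, rfl⟩ := hz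
  positivity

lemma pvSumRange (n : Nat) (f : Nat → Int) : ((List.range n).map f).sum = ∑ i ∈ Finset.range n, f i := rfl

lemma pvA_len (p q : List Int) : (mul_even p q).length = (p.length + q.length) >>> 1 := by
  unfold mul_even
  dsimp only
  rw [pvOuter_len, List.length_replicate]

lemma pvA_getD (p q : List Int) (t : Nat) (ht : t < (p.length + q.length) >>> 1) :
    (mul_even p q).getD t 0 =
      ∑ i ∈ Finset.range p.length, ∑ j ∈ Finset.range q.length,
        if (i:Int) + (j:Int) = 2*(t:Int) then p.getD i 0 * q.getD j 0 else 0 := by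
  unfold mul_even
  dsimp only
  rw [pvOuter_getD q _ (pvEnum_nonneg p) (pvEnum_nonneg q), List.getD_replicate]
  rw [pvEnum_eq p 0, pvEnum_eq q 0]
  simp only [List.map_map, Function.comp_def, List.length_replicate, ht, and_true, zero_add,
    pvSumRange]
  exact ht

lemma pvA_inner_sum (p q : List Int) (t i : Nat) :
    (∑ j ∈ Finset.range q.length,
        if (i:Int) + (j:Int) = 2*(t:Int) then p.getD i 0 * q.getD j 0 else 0) =
      if i ≤ 2*t then pvP p q t i else 0 := by
  by_cases hi : i ≤ 2*t
  · rw [if_pos hi]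
    have hcong : ∀ j ∈ Finset.range q.length,
        (if (i:Int) + (j:Int) = 2*(t:Int) then p.getD i 0 * q.getD j 0 else 0) =
        (if j = 2*t - i then p.getD i 0 * q.getD j 0 else 0) := by
      intro j _
      congr 1
      rw [eq_iff_iff]
      constructor <;> (intro h; omega)
    rw [Finset.sum_congr rfl hcong, Finset.sum_ite_eq' (Finset.range q.length) (2*t-i) _]
    unfold pvP
    by_cases hq : 2*t - i < q.length
    · rw [if_pos (Finset.mem_range.mpr hq)]
    · rw [if_neg (fun hmem => hq (Finset.mem_range.mp hmem)),
          List.getD_eq_default q 0 (by omega), mul_zero]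
  · rw [if_neg hi]
    apply Finset.sum_eq_zero
    intro j _
    rw [if_neg (by omega)]

lemma pvA_entry (p q : List Int) (t : Nat) (ht : t < (p.length + q.length) >>> 1) :
    (mul_even p q).getD t 0 = ∑ i ∈ Finset.range (2*t+1), pvP p q t i := by
  rw [pvA_getD p q t ht]
  have h1 : ∀ i ∈ Finset.range p.length,
      (∑ j ∈ Finset.range q.length,
        if (i:Int) + (j:Int) = 2*(t:Int) then p.getD i 0 * q.getD j 0 else 0) =
      if i ∈ Finset.range (2*t+1) then pvP p q t i else 0 := by
    intro i _
    rw [pvA_inner_sum]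
    congr 1
    rw [eq_iff_iff, Finset.mem_range]
    omega
  rw [Finset.sum_congr rfl h1, Finset.sum_ite_mem]
  apply Finset.sum_subset
  · exact fun x hx => Finset.mem_range.mpr (by
      have := Finset.mem_inter.mp hx
      exact Finset.mem_range.mp this.2)
  · intro x hx hnx
    have hxl : ¬ (x < p.length) := fun hc => hnx (Finset.mem_inter.mpr
      ⟨Finset.mem_range.mpr hc, hx⟩)
    unfold pvP
    rw [List.getD_eq_default p 0 (by omega), zero_mul]

lemma pvNshift (a : Nat) : (((a : Nat) : Int) >>> (1:Nat)) = ((a >>> 1 : Nat) : Int) := by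
  rw [Int.shiftRight_eq_div_pow, Nat.shiftRight_eq_div_pow]
  simp [Int.natCast_ediv]

lemma pvB_len (p q : List Int) : (mul_even_alt p q).length = (p.length + q.length) >>> 1 := by
  unfold mul_even_alt
  dsimp only
  rw [List.length_map, pvNshift, PySem.List.length_pyRange_one]
  omega

lemma pvB_coeff_eq (p q : List Int) (t : Nat) (ht : t < (p.length + q.length) >>> 1) :
    pvB_coeff p q (t : Int) = ∑ i ∈ Finset.range (2*t+1), pvP p q t i := by
  unfold pvB_coeff
  have hb : 2*(t:Nat) + 2 ≤ p.length + q.length := by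
    rw [Nat.shiftRight_eq_div_pow] at ht
    omega
  set lo : Int := max 0 (2*(t:Int) - (q.length:Int) + 1) with hlo
  set hi : Int := min (2*(t:Int) + 1) (p.length:Int) with hhi
  have h0lo : (0:Int) ≤ lo := le_max_left _ _
  have hlohi : lo ≤ hi := by
    rw [hlo, hhi]
    omega
  have hhi2t : hi ≤ 2*(t:Int) + 1 := min_le_left _ _
  have hside1 : ∀ x ∈ (PySem.List.pyRange 0 lo 1).map
      (fun i => PySem.List.pyGetD p i 0 * PySem.List.pyGetD q (2*(t:Int) - i) 0), x = 0 := by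
    intro x hx
    obtain ⟨i, hi1, rfl⟩ := List.mem_map.mp hx
    rw [PySem.List.mem_pyRange_one] at hi1
    have hge : (q.length : Int) ≤ 2*(t:Int) - i := by omega
    rw [PySem.List.pyGetD_of_nonneg q 0 (by omega), List.getD_eq_default q 0 (by omega), mul_zero]
  have hside2 : ∀ x ∈ (PySem.List.pyRange hi (2*(t:Int)+1) 1).map
      (fun i => PySem.List.pyGetD p i 0 * PySem.List.pyGetD q (2*(t:Int) - i) 0), x = 0 := by
    intro x hx
    obtain ⟨i, hi1, rfl⟩ := List.mem_map.mp hx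
    rw [PySem.List.mem_pyRange_one] at hi1
    have hge : (p.length : Int) ≤ i := by omega
    rw [PySem.List.pyGetD_of_nonneg p 0 (by omega), List.getD_eq_default p 0 (by omega), zero_mul]
  have hfull : ((PySem.List.pyRange 0 (2*(t:Int)+1) 1).map
      (fun i => PySem.List.pyGetD p i 0 * PySem.List.pyGetD q (2*(t:Int) - i) 0)).sum =
      ((PySem.List.pyRange lo hi 1).map
      (fun i => PySem.List.pyGetD p i 0 * PySem.List.pyGetD q (2*(t:Int) - i) 0)).sum := by
    rw [PySem.List.pyRange_one_append 0 lo (2*(t:Int)+1) h0lo (by omega),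
        PySem.List.pyRange_one_append lo hi (2*(t:Int)+1) hlohi hhi2t]
    rw [List.map_append, List.map_append, List.sum_append, List.sum_append,
        List.sum_eq_zero hside1, List.sum_eq_zero hside2, zero_add, add_zero]
  rw [← hfull, PySem.List.pyRange_one, List.map_map]
  have : ((2*(t:Int)+1) - 0).toNat = 2*t+1 := by omega
  rw [this, pvSumRange]
  apply Finset.sum_congr rfl
  intro k hk
  have hk2t : k ≤ 2*t := by
    have := Finset.mem_range.mp hk
    omega
  show PySem.List.pyGetD p ((0:Int) + (k:Int)) 0 * PySem.List.pyGetD q (2*(t:Int) - ((0:Int) + (k:Int))) 0 = pvP p q t k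
  rw [zero_add, PySem.List.pyGetD_natCast, PySem.List.pyGetD_of_nonneg q 0 (by omega)]
  unfold pvP
  have hidx : ((2*(t:Int) - (k:Int)).toNat) = 2*t - k := by omega
  rw [hidx]

lemma pvB_entry (p q : List Int) (t : Nat) (ht : t < (p.length + q.length) >>> 1) :
    (mul_even_alt p q).getD t 0 = ∑ i ∈ Finset.range (2*t+1), pvP p q t i := by
  have hlen : t < (mul_even_alt p q).length := by rw [pvB_len]; exact ht
  rw [List.getD_eq_getElem _ 0 hlen]
  unfold mul_even_alt
  dsimp only
  rw [List.getElem_map, PySem.List.getElem_pyRange_one, zero_add]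
  exact pvB_coeff_eq p q t ht

-- ===== VERDICT (by name: the statement is the Claim_ definition above) =====
theorem mul_even_spec : Claim_equal_mul_even := by
  intro p q _
  unfold Spec_mul_even
  apply List.ext_getElem
  · rw [pvA_len, pvB_len]
  · intro t h1 h2
    have ht : t < (p.length + q.length) >>> 1 := by rw [pvA_len] at h1; exact h1
    rw [← List.getD_eq_getElem (mul_even p q) 0 h1, ← List.getD_eq_getElem (mul_even_alt p q) 0 h2,
        pvA_entry p q t ht, pvB_entry p q t ht]
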